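-- pv_equiv track=rewrite | github.com/IceTheCoder/Passwordsy | code/password_generation/sentence_input_logic.py | produce_password
-- ===== SOURCE A (Python) =====
-- import string
--
-- def produce_password(char_dict) -> list:
--     """
--     This function gets the characters that are needed to be highlighted:
--     starting letters of every word and any digits or punctuation
--     """
--     letters_to_be_coloured = {}
--     password = ''
--
--     first_letter_taken = False
--     for key, value in char_dict.items():
--         if value in string.punctuation or value in string.digits:
--             letters_to_be_coloured[f'1.{key}'] = f'1.{key + 1}'
--             password += value
--         elif value == 'space':
--             first_letter_taken = False
--         elif not first_letter_taken:
--             letters_to_be_coloured[f'1.{key}'] = f'1.{key + 1}'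
--             password += value
--             first_letter_taken = True
--
--     return [letters_to_be_coloured, password]
-- ===== SOURCE B (Python) =====
-- import string
--
--
-- def _special(value) -> bool:
--     """True for values the password always keeps (digits / punctuation)."""
--     return value in string.punctuation or value in string.digits
--
--
-- def _segments(items) -> list:
--     """Split the ordered items into word segments, dropping the 'space' markers."""
--     segments = []
--     current = []
--     for item in items:
--         if item[1] == 'space':
--             segments.append(current)
--             current = []
--         else:
--             current.append(item)
--     segments.append(current)
--     return segments
--
--
-- def _kept(segment) -> list:
--     """Items of one word that get coloured: its leading specials, then its first
--     letter (if any), then every later special item, in original order."""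
--     rest = segment
--     head = []
--     while rest and _special(rest[0][1]):
--         head.append(rest[0])
--         rest = rest[1:]
--     if not rest:
--         return head
--     return head + [rest[0]] + [kv for kv in rest[1:] if _special(kv[1])]
--
--
-- def produce_password(char_dict) -> list:
--     letters_to_be_coloured = {}
--     parts = []
--     for segment in _segments(char_dict.items()):
--         for key, value in _kept(segment):
--             letters_to_be_coloured[f'1.{key}'] = f'1.{key + 1}'
--             parts.append(value)
--     return [letters_to_be_coloured, ''.join(parts)]
-- ===== Notes on version B (the rewrite author's own statement) =====
-- stated objective: alternative
-- what changed: B first partitions the items into word segments at the 'space' markers, then selects each segment's coloured items positionally (leading specials, first letter, later specials) with no running boolean flag, collecting password pieces in a list joined once at the end, instead of A's single stateful pass with a first_letter_taken flag and string concatenation.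
import Mathlib
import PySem

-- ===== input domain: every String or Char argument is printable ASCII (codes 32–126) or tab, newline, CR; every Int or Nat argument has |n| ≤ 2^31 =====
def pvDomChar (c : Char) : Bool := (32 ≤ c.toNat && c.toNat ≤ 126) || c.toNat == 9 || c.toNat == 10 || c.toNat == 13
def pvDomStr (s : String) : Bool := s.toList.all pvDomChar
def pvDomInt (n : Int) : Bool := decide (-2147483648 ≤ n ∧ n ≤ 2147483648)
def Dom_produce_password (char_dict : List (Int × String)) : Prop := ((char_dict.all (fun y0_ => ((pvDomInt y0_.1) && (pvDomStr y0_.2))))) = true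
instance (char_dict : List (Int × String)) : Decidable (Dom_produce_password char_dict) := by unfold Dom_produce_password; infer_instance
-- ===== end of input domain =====

-- B partitions the items into 'space'-delimited word segments and picks each word's coloured
-- items positionally (no running flag), joining the password pieces once at the end: a
-- different decomposition of the same task (objective: alternative; no speed claim).

-- ===== PORT A =====
def pvPunct : String := "!\"#$%&'()*+,-./:;<=>?@[\\]^_`{|}~"   -- string.punctuation
def pvDigits : String := "0123456789"                            -- string.digits
def pvTag (k : Int) : String := "1." ++ PySem.Int.toStr k        -- f'1.{k}'

def pvStepA (st : PySem.Dict String String × String × Bool) (kv : Int × String) :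
    PySem.Dict String String × String × Bool :=
  if PySem.Str.isIn kv.2 pvPunct || PySem.Str.isIn kv.2 pvDigits then
    (st.1.insert (pvTag kv.1) (pvTag (kv.1 + 1)), st.2.1 ++ kv.2, st.2.2)
  else if kv.2 == "space" then (st.1, st.2.1, false)
  else if !st.2.2 then (st.1.insert (pvTag kv.1) (pvTag (kv.1 + 1)), st.2.1 ++ kv.2, true)
  else st

def produce_password (char_dict : List (Int × String)) : (List (String × String)) × String :=
  let st := char_dict.foldl pvStepA ((PySem.Dict.empty : PySem.Dict String String), "", false)
  (st.1.items, st.2.1)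

-- ===== PORT B =====
def pvSpecial (v : String) : Bool := PySem.Str.isIn v pvPunct || PySem.Str.isIn v pvDigits

def pvSegStep (p : List (List (Int × String)) × List (Int × String)) (it : Int × String) :
    List (List (Int × String)) × List (Int × String) :=
  if it.2 == "space" then (p.1 ++ [p.2], []) else (p.1, p.2 ++ [it])

def pvSegs (items : List (Int × String)) : List (List (Int × String)) :=
  let p := items.foldl pvSegStep ([], [])
  p.1 ++ [p.2]

-- port of _kept's while loop (peel the maximal special prefix); structural recursion, exact
def pvHeadRest : List (Int × String) → List (Int × String) × List (Int × String)
  | [] => ([], [])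
  | kv :: t =>
    if pvSpecial kv.2 then
      let p := pvHeadRest t
      (kv :: p.1, p.2)
    else ([], kv :: t)

def pvKept (seg : List (Int × String)) : List (Int × String) :=
  let p := pvHeadRest seg
  match p.2 with
  | [] => p.1
  | x :: t => p.1 ++ x :: t.filter (fun kv => pvSpecial kv.2)

def pvStepB (st : PySem.Dict String String × List String) (kv : Int × String) :
    PySem.Dict String String × List String :=
  (st.1.insert (pvTag kv.1) (pvTag (kv.1 + 1)), st.2 ++ [kv.2])

def produce_password_alt (char_dict : List (Int × String)) : (List (String × String)) × String :=
  let st := (pvSegs char_dict).foldl (fun st seg => (pvKept seg).foldl pvStepB st)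
    ((PySem.Dict.empty : PySem.Dict String String), [])
  (st.1.items, PySem.Str.join "" st.2)

-- ===== PRECONDITION & SPEC =====
def Spec_produce_password (char_dict : List (Int × String)) (out : (List (String × String)) × String) : Prop := out = produce_password_alt char_dict
instance (char_dict : List (Int × String)) (out : (List (String × String)) × String) : Decidable (Spec_produce_password char_dict out) := by unfold Spec_produce_password; infer_instance

-- ===== CLAIM (what is proved, stated in full; the proofs are below) =====
def Claim_equal_produce_password : Prop := ∀ (char_dict : List (Int × String)), Dom_produce_password char_dict → Spec_produce_password char_dict (produce_password char_dict)

-- ===== LEMMAS AND PROOFS =====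

-- split at the 'space' items, recursively (proof-side mirror of pvSegs)
def pvSplitSp : List (Int × String) → List (List (Int × String))
  | [] => [[]]
  | kv :: t =>
    if kv.2 == "space" then [] :: pvSplitSp t
    else
      match pvSplitSp t with
      | [] => [[kv]]
      | s :: ss => (kv :: s) :: ss

theorem pvSplitSp_ne_nil (l : List (Int × String)) : pvSplitSp l ≠ [] := by
  induction l with
  | nil => simp [pvSplitSp]
  | cons kv t ih =>
    simp only [pvSplitSp]
    split_ifs
    · simp
    · cases h : pvSplitSp t <;> simp

def pvMapHead (f : List (Int × String) → List (Int × String)) :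
    List (List (Int × String)) → List (List (Int × String))
  | [] => []
  | s :: ss => f s :: ss

theorem pvSegs_go (l : List (Int × String)) :
    ∀ acc cur, (l.foldl pvSegStep (acc, cur)).1 ++ [(l.foldl pvSegStep (acc, cur)).2]
      = acc ++ pvMapHead (cur ++ ·) (pvSplitSp l) := by
  induction l with
  | nil => intro acc cur; simp [pvSplitSp, pvMapHead]
  | cons kv t ih =>
    intro acc cur
    by_cases h : (kv.2 == "space") = true
    · have : (kv :: t).foldl pvSegStep (acc, cur) = t.foldl pvSegStep (acc ++ [cur], []) := by
        simp [List.foldl_cons, pvSegStep, h]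
      rw [this, ih]
      cases h' : pvSplitSp t with
      | nil => exact absurd h' (pvSplitSp_ne_nil t)
      | cons s ss => simp [pvSplitSp, h, h', pvMapHead]
    · have : (kv :: t).foldl pvSegStep (acc, cur) = t.foldl pvSegStep (acc, cur ++ [kv]) := by
        simp [List.foldl_cons, pvSegStep, h]
      rw [this, ih]
      cases h' : pvSplitSp t with
      | nil => exact absurd h' (pvSplitSp_ne_nil t)
      | cons s ss => simp [pvSplitSp, h, h', pvMapHead]

theorem pvSegs_eq (l : List (Int × String)) : pvSegs l = pvSplitSp l := by
  have := pvSegs_go l [] []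
  cases h : pvSplitSp l with
  | nil => exact absurd h (pvSplitSp_ne_nil l)
  | cons s ss => simp [pvSegs, h, pvMapHead] at this ⊢; exact this

theorem pvSplitSp_no_space (l : List (Int × String)) :
    ∀ seg ∈ pvSplitSp l, ∀ kv ∈ seg, (kv.2 == "space") = false := by
  induction l with
  | nil => simp [pvSplitSp]
  | cons kv t ih =>
    intro seg hseg x hx
    by_cases h : (kv.2 == "space") = true
    · rw [pvSplitSp, if_pos h] at hseg
      rcases List.mem_cons.mp hseg with rfl | hseg
      · exact absurd hx (List.not_mem_nil)
      · exact ih seg hseg x hx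
    · cases h' : pvSplitSp t with
      | nil => exact absurd h' (pvSplitSp_ne_nil t)
      | cons s ss =>
        rw [pvSplitSp, if_neg h, h'] at hseg
        rcases List.mem_cons.mp hseg with rfl | hseg
        · rcases List.mem_cons.mp hx with rfl | hx
          · simpa using h
          · exact ih s (by simp [h']) x hx
        · exact ih seg (by simp [h', hseg]) x hx

theorem pvInter_nil (l : List (List Char)) : [].intercalate l = l.flatten := by
  induction l with
  | nil => rfl
  | cons a t ih => cases t <;> simp_all [List.intercalate, List.intersperse]

-- projection dropping A's flag
def pvProj (st : PySem.Dict String String × String × Bool) :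
    PySem.Dict String String × String := (st.1, st.2.1)

-- A = segment-wise processing with the flag reset at every segment start
theorem pvA_decomp (l : List (Int × String)) :
    ∀ st, pvProj (l.foldl pvStepA st)
      = match pvSplitSp l with
        | [] => pvProj st
        | s :: ss => ss.foldl (fun p seg => pvProj (seg.foldl pvStepA (p.1, p.2, false)))
            (pvProj (s.foldl pvStepA st)) := by
  induction l with
  | nil => intro st; simp [pvSplitSp]
  | cons kv t ih =>
    intro st
    by_cases hspace : (kv.2 == "space") = true
    · have hv : kv.2 = "space" := by simpa using hspace
      have hns : (PySem.Str.isIn kv.2 pvPunct || PySem.Str.isIn kv.2 pvDigits) = false := by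
        rw [hv]; decide
      have hstep : pvStepA st kv = (st.1, st.2.1, false) := by
        simp only [pvStepA, hns, hspace]; simp
      rw [List.foldl_cons, hstep, ih]
      cases h' : pvSplitSp t with
      | nil => exact absurd h' (pvSplitSp_ne_nil t)
      | cons s ss => simp [pvSplitSp, hspace, h', pvProj]
    · rw [List.foldl_cons, ih]
      cases h' : pvSplitSp t with
      | nil => exact absurd h' (pvSplitSp_ne_nil t)
      | cons s ss => simp [pvSplitSp, hspace, h', pvProj]

-- the common "keep this item" action
def pvPush (p : PySem.Dict String String × String) (kv : Int × String) :
    PySem.Dict String String × String :=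
  (p.1.insert (pvTag kv.1) (pvTag (kv.1 + 1)), p.2 ++ kv.2)

theorem pvSegT (seg : List (Int × String))
    (hs : ∀ kv ∈ seg, (kv.2 == "space") = false) :
    ∀ d pw, pvProj (seg.foldl pvStepA (d, pw, true))
      = (seg.filter (fun kv => pvSpecial kv.2)).foldl pvPush (d, pw) := by
  induction seg with
  | nil => intro d pw; simp [pvProj]
  | cons kv t ih =>
    intro d pw
    have hkv : (kv.2 == "space") = false := hs kv (List.mem_cons_self ..)
    have iht := ih (fun x hx => hs x (List.mem_cons_of_mem _ hx))
    by_cases hsp : (PySem.Str.isIn kv.2 pvPunct || PySem.Str.isIn kv.2 pvDigits) = true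
    · have hstep : pvStepA (d, pw, true) kv
          = (d.insert (pvTag kv.1) (pvTag (kv.1 + 1)), pw ++ kv.2, true) := by
        simp only [pvStepA, hsp]; simp
      rw [List.foldl_cons, hstep, iht]
      have hq : pvSpecial kv.2 = true := hsp
      simp [hq, pvPush]
    · have hstep : pvStepA (d, pw, true) kv = (d, pw, true) := by
        have hsp' : (PySem.Str.isIn kv.2 pvPunct || PySem.Str.isIn kv.2 pvDigits) = false := by
          simpa using hsp
        simp only [pvStepA, hsp', hkv]; simp
      rw [List.foldl_cons, hstep, iht]
      have hq : pvSpecial kv.2 = false := by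
        cases h : pvSpecial kv.2 with
        | false => rfl
        | true => exact absurd h hsp
      simp [hq]

theorem pvKept_cons_special (kv : Int × String) (t : List (Int × String))
    (hsp : pvSpecial kv.2 = true) : pvKept (kv :: t) = kv :: pvKept t := by
  cases h2 : (pvHeadRest t).2 <;> simp [pvKept, pvHeadRest, hsp, h2]

theorem pvSegF (seg : List (Int × String))
    (hs : ∀ kv ∈ seg, (kv.2 == "space") = false) :
    ∀ d pw, pvProj (seg.foldl pvStepA (d, pw, false))
      = (pvKept seg).foldl pvPush (d, pw) := by
  induction seg with
  | nil => intro d pw; simp [pvProj, pvKept, pvHeadRest]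
  | cons kv t ih =>
    intro d pw
    have hkv : (kv.2 == "space") = false := hs kv (List.mem_cons_self ..)
    have hst : ∀ x ∈ t, (x.2 == "space") = false :=
      fun x hx => hs x (List.mem_cons_of_mem _ hx)
    by_cases hsp : (PySem.Str.isIn kv.2 pvPunct || PySem.Str.isIn kv.2 pvDigits) = true
    · have hstep : pvStepA (d, pw, false) kv
          = (d.insert (pvTag kv.1) (pvTag (kv.1 + 1)), pw ++ kv.2, false) := by
        simp only [pvStepA, hsp]; simp
      rw [List.foldl_cons, hstep, ih hst,
        pvKept_cons_special kv t hsp, List.foldl_cons]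
      rfl
    · have hstep : pvStepA (d, pw, false) kv
          = (d.insert (pvTag kv.1) (pvTag (kv.1 + 1)), pw ++ kv.2, true) := by
        have hsp' : (PySem.Str.isIn kv.2 pvPunct || PySem.Str.isIn kv.2 pvDigits) = false := by
          simpa using hsp
        simp only [pvStepA, hsp', hkv]; simp
      have hq : pvSpecial kv.2 = false := by
        cases h : pvSpecial kv.2 with
        | false => rfl
        | true => exact absurd h hsp
      have hkept : pvKept (kv :: t) = kv :: t.filter (fun x => pvSpecial x.2) := by
        simp [pvKept, pvHeadRest, hq]
      rw [List.foldl_cons, hstep, pvSegT t hst, hkept, List.foldl_cons]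
      rfl

theorem pvJoin_cons (v : String) (l : List String) :
    PySem.Str.join "" (v :: l) = v ++ PySem.Str.join "" l := by
  simp [PySem.Str.join, PySem.Chars.join, pvInter_nil, String.ofList_append]

theorem pvJoin_append (a b : List String) :
    PySem.Str.join "" (a ++ b) = PySem.Str.join "" a ++ PySem.Str.join "" b := by
  simp [PySem.Str.join, PySem.Chars.join, pvInter_nil, String.ofList_append]

def pvFoldD (d : PySem.Dict String String) (l : List (Int × String)) : PySem.Dict String String :=
  l.foldl (fun d kv => d.insert (pvTag kv.1) (pvTag (kv.1 + 1))) d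

theorem pvPush_eq (l : List (Int × String)) :
    ∀ d pw, l.foldl pvPush (d, pw) = (pvFoldD d l, pw ++ PySem.Str.join "" (l.map Prod.snd)) := by
  induction l with
  | nil =>
    intro d pw
    have h0 : PySem.Str.join "" ([] : List String) = "" := rfl
    simp [pvFoldD, h0]
  | cons kv t ih =>
    intro d pw
    rw [List.foldl_cons, List.map_cons, pvJoin_cons]
    show t.foldl pvPush (pvPush (d, pw) kv) = _
    rw [ih]
    simp [pvPush, pvFoldD, String.append_assoc]

theorem pvStepB_eq (l : List (Int × String)) :
    ∀ d parts, l.foldl pvStepB (d, parts) = (pvFoldD d l, parts ++ l.map Prod.snd) := by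
  induction l with
  | nil => intro d parts; simp [pvFoldD]
  | cons kv t ih =>
    intro d parts
    rw [List.foldl_cons]
    show t.foldl pvStepB (pvStepB (d, parts) kv) = _
    rw [ih]
    simp [pvStepB, pvFoldD]

theorem pvGlue (segs : List (List (Int × String))) :
    ∀ d parts,
      segs.foldl (fun p seg => (pvKept seg).foldl pvPush p) (d, PySem.Str.join "" parts)
        = (let q := segs.foldl (fun st seg => (pvKept seg).foldl pvStepB st) (d, parts)
           (q.1, PySem.Str.join "" q.2)) := by
  induction segs with
  | nil => intro d parts; rfl
  | cons s rest ih =>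
    intro d parts
    simp only [List.foldl_cons, pvPush_eq, pvStepB_eq, ← pvJoin_append]
    exact ih _ _

-- ===== VERDICT (by name: the statement is the Claim_ definition above) =====
theorem produce_password_spec : Claim_equal_produce_password := by
  intro l _
  unfold Spec_produce_password produce_password produce_password_alt
  have hA := pvA_decomp l ((PySem.Dict.empty : PySem.Dict String String), "", false)
  have hA' : pvProj (l.foldl pvStepA ((PySem.Dict.empty : PySem.Dict String String), "", false))
      = (pvSplitSp l).foldl
          (fun p seg => pvProj (seg.foldl pvStepA (p.1, p.2, false)))
          ((PySem.Dict.empty : PySem.Dict String String), "") := by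
    rw [hA]
    cases h' : pvSplitSp l with
    | nil => exact absurd h' (pvSplitSp_ne_nil l)
    | cons s ss => simp [pvProj]
  have hcongr := PySem.List.foldl_congr_mem (pvSplitSp l)
    (fun p seg => pvProj (seg.foldl pvStepA (p.1, p.2, false)))
    (fun p seg => (pvKept seg).foldl pvPush p)
    ((PySem.Dict.empty : PySem.Dict String String), "")
    (fun p seg hseg => pvSegF seg (pvSplitSp_no_space l seg hseg) p.1 p.2)
  have hglue := pvGlue (pvSplitSp l) (PySem.Dict.empty : PySem.Dict String String) []
  have hjnil : PySem.Str.join "" ([] : List String) = "" := rfl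
  rw [hjnil] at hglue
  have hfin : pvProj (l.foldl pvStepA ((PySem.Dict.empty : PySem.Dict String String), "", false))
      = (let q := (pvSplitSp l).foldl (fun st seg => (pvKept seg).foldl pvStepB st)
            ((PySem.Dict.empty : PySem.Dict String String), ([] : List String))
         (q.1, PySem.Str.join "" q.2)) := by
    rw [hA', hcongr, hglue]
  rw [pvSegs_eq]
  exact congrArg (fun p => (p.1.items, p.2)) hfin
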